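-- pv_equiv track=rewrite | github.com/Jonatas4ndrade/CodeWars | 4 - Squares Check/squares_check.py | comp
-- ===== SOURCE A (Python) =====
-- from collections import defaultdict
--
-- def comp(array1, array2):
--
--     if array1 is None or array2 is None:
--         return False
--
--     # Dictionaries were used as they are implemented using hash tables
--     # and don't need to be sorted for comparison
--     # Check documention on dict_equal(PyDictObject *a, PyDictObject *b) function.
--     dic1 = defaultdict(int)
--     dic2 = defaultdict(int)
--
--     for value in array1:
--         dic1[value ** 2] += 1
--
--     for value in array2:
--         dic2[value] += 1
--
--     return dic1 == dic2
-- ===== SOURCE B (Python) =====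
-- def comp(array1, array2):
--     if array1 is None or array2 is None:
--         return False
--     return sorted(x ** 2 for x in array1) == sorted(array2)
-- ===== Notes on version B (the rewrite author's own statement) =====
-- stated objective: simpler
-- what changed: Replaces A's two defaultdict frequency tables and dict comparison with a single order-based multiset check: sort the squares of array1 and sort array2 and compare the sequences.
import Mathlib
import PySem

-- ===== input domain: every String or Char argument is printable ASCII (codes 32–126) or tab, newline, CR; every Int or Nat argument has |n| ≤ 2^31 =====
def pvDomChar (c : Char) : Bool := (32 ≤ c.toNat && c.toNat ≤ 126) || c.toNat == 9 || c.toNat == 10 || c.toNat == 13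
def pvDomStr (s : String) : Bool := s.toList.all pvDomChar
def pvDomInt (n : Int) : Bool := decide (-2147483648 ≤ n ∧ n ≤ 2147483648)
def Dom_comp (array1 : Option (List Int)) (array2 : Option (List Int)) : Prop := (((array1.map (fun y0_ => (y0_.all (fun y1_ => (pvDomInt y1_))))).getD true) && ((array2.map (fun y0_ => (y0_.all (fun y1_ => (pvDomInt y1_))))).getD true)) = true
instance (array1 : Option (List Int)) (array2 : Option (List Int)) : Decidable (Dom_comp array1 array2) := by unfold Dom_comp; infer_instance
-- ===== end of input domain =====

-- B replaces A's two defaultdict frequency tables with a sorted-sequence comparison (simpler).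

-- ===== PORT A =====
-- Python's dict == ignores insertion order: same size and every item of d1 found in d2.
def pyDictEqInt (d1 d2 : PySem.Dict Int Int) : Bool :=
  d1.size == d2.size && d1.items.all (fun p => d2.get? p.1 == some p.2)

def comp (array1 : Option (List Int)) (array2 : Option (List Int)) : Bool :=
  match array1, array2 with
  | none, _ => false
  | _, none => false
  | some a1, some a2 =>
    let dic1 := a1.foldl (fun d v => d.modify (v ^ 2) 0 (· + 1)) PySem.Dict.empty
    let dic2 := a2.foldl (fun d v => d.modify v 0 (· + 1)) PySem.Dict.empty
    pyDictEqInt dic1 dic2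

-- ===== PORT B =====
def comp_alt (array1 : Option (List Int)) (array2 : Option (List Int)) : Bool :=
  match array1, array2 with
  | none, _ => false
  | _, none => false
  | some a1, some a2 =>
    PySem.List.sorted (a1.map (fun x => x ^ 2)) (fun x => x)
      == PySem.List.sorted a2 (fun x => x)

-- ===== PRECONDITION & SPEC =====
def Spec_comp (array1 : Option (List Int)) (array2 : Option (List Int)) (out : Bool) : Prop := out = comp_alt array1 array2
instance (array1 : Option (List Int)) (array2 : Option (List Int)) (out : Bool) : Decidable (Spec_comp array1 array2 out) := by unfold Spec_comp; infer_instance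

-- ===== CLAIM (what is proved, stated in full; the proofs are below) =====
def Claim_equal_comp : Prop := ∀ (array1 : Option (List Int)) (array2 : Option (List Int)), Dom_comp array1 array2 → Spec_comp array1 array2 (comp array1 array2)

-- ===== LEMMAS AND PROOFS =====

theorem pyDictEqInt_counter_iff (l1 l2 : List Int) :
    pyDictEqInt (PySem.Dict.counter l1) (PySem.Dict.counter l2) = true ↔ l1.Perm l2 := by
  unfold pyDictEqInt
  simp only [Bool.and_eq_true, beq_iff_eq, List.all_eq_true]
  constructor
  · rintro ⟨hsize, hall⟩
    have hcnt : ∀ k : Int, k ∈ PySem.Set.ofList l1 →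
        k ∈ PySem.Set.ofList l2 ∧ l2.count k = l1.count k := by
      intro k hk
      have hp : (k, (l1.count k : Int)) ∈ (PySem.Dict.counter l1).items := by
        rw [PySem.Dict.items_counter]
        exact List.mem_map.mpr ⟨k, hk, rfl⟩
      have := hall _ hp
      have hmem := PySem.Dict.mem_items_of_get?_eq_some _ this
      rw [PySem.Dict.items_counter] at hmem
      obtain ⟨j, hj, he⟩ := List.mem_map.mp hmem
      have h1 : j = k := congrArg Prod.fst he
      have h2 : (l2.count j : Int) = (l1.count k : Int) := congrArg Prod.snd he
      subst h1
      exact ⟨hj, by exact_mod_cast h2⟩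
    have hsub : PySem.Set.ofList l1 ⊆ PySem.Set.ofList l2 := fun k hk => (hcnt k hk).1
    have hlen : (PySem.Set.ofList l2).length ≤ (PySem.Set.ofList l1).length := by
      have : (PySem.Dict.counter l1).size = (PySem.Set.ofList l1).length := by
        simp [PySem.Dict.size, PySem.Dict.items_counter]
      have h2 : (PySem.Dict.counter l2).size = (PySem.Set.ofList l2).length := by
        simp [PySem.Dict.size, PySem.Dict.items_counter]
      omega
    have hperm : (PySem.Set.ofList l1).Perm (PySem.Set.ofList l2) :=
      ((PySem.Set.nodup_ofList l1).subperm hsub).perm_of_length_le hlen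
    refine List.perm_iff_count.mpr fun k => ?_
    by_cases hk : k ∈ l1
    · exact ((hcnt k (PySem.Set.mem_ofList _ _ |>.mpr hk)).2).symm
    · have hk2 : k ∉ l2 := by
        intro hk2
        exact hk ((PySem.Set.mem_ofList _ _).mp (hperm.mem_iff.mpr (PySem.Set.mem_ofList _ _ |>.mpr hk2)))
      simp [List.count_eq_zero_of_not_mem, hk, hk2]
  · intro hperm
    have hmemiff : ∀ k : Int, k ∈ PySem.Set.ofList l1 ↔ k ∈ PySem.Set.ofList l2 := by
      intro k
      rw [PySem.Set.mem_ofList, PySem.Set.mem_ofList, hperm.mem_iff]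
    have hsperm : (PySem.Set.ofList l1).Perm (PySem.Set.ofList l2) :=
      (List.perm_ext_iff_of_nodup (PySem.Set.nodup_ofList l1) (PySem.Set.nodup_ofList l2)).mpr hmemiff
    constructor
    · simp [PySem.Dict.size, PySem.Dict.items_counter, hsperm.length_eq]
    · intro p hp
      rw [PySem.Dict.items_counter] at hp
      obtain ⟨k, hk, he⟩ := List.mem_map.mp hp
      subst he
      have hk2 : (k, (l2.count k : Int)) ∈ (PySem.Dict.counter l2).items := by
        rw [PySem.Dict.items_counter]
        exact List.mem_map.mpr ⟨k, (hmemiff k).mp hk, rfl⟩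
      have hg := PySem.Dict.get?_of_mem_items _ hk2 (PySem.Dict.nodup_keys_counter l2)
      rw [hg, List.perm_iff_count.mp hperm k]
  -- ^ closes the counter characterisation

theorem sorted_eq_iff_perm (l1 l2 : List Int) :
    PySem.List.sorted l1 (fun x => x) = PySem.List.sorted l2 (fun x => x) ↔ l1.Perm l2 := by
  constructor
  · intro h
    have p1 := PySem.List.sorted_perm l1 (fun x => x) false
    have p2 := PySem.List.sorted_perm l2 (fun x => x) false
    exact p1.symm.trans (h ▸ p2)
  · intro hperm
    refine PySem.List.sorted_id_eq_of_perm_of_pairwise _ _ ?_ ?_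
    · exact (PySem.List.sorted_perm l2 (fun x => x) false).trans hperm.symm
    · exact PySem.List.sorted_pairwise l2 (fun x => x)

-- ===== VERDICT (by name: the statement is the Claim_ definition above) =====
theorem comp_spec : Claim_equal_comp := by
  intro array1 array2 _
  unfold Spec_comp comp comp_alt
  match array1, array2 with
  | none, _ => rfl
  | some a1, none => rfl
  | some a1, some a2 =>
    simp only
    have hd1 : a1.foldl (fun d v => d.modify (v ^ 2) 0 (· + 1)) PySem.Dict.empty
        = PySem.Dict.counter (a1.map (fun x => x ^ 2)) := by
      rw [PySem.Dict.counter_eq_foldl, List.foldl_map]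
    have hd2 : a2.foldl (fun d v => d.modify v 0 (· + 1)) PySem.Dict.empty
        = PySem.Dict.counter a2 := (PySem.Dict.counter_eq_foldl a2).symm
    rw [hd1, hd2]
    by_cases h : (a1.map (fun x => x ^ 2)).Perm a2
    · rw [(pyDictEqInt_counter_iff _ _).mpr h, (beq_iff_eq ..).mpr ((sorted_eq_iff_perm _ _).mpr h)]
    · have h1 : pyDictEqInt (PySem.Dict.counter (a1.map (fun x => x ^ 2))) (PySem.Dict.counter a2) = false := by
        rw [Bool.eq_false_iff]
        intro hc; exact h ((pyDictEqInt_counter_iff _ _).mp hc)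
      have h2 : (PySem.List.sorted (a1.map (fun x => x ^ 2)) (fun x => x)
          == PySem.List.sorted a2 (fun x => x)) = false := by
        rw [Bool.eq_false_iff]
        intro hc; exact h ((sorted_eq_iff_perm _ _).mp (beq_iff_eq .. |>.mp hc))
      rw [h1, h2]
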